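-- pv_equiv track=rewrite | github.com/all-day-and-night/algorithms | programmers/sortFileName.py | fileSplit
-- ===== SOURCE A (Python) =====
-- def fileSplit(file):
--     head = ""
--     temp = list(file[::-1])
--     # head
--     while temp:
--         if temp[-1].isdigit():
--             break
--         else:
--             head += temp.pop()
--
--     # Number
--     number = ""
--     while temp:
--         if temp[-1].isdigit():
--             number += temp.pop()
--         else:
--             break
--
--     head = head.lower()
--     number = int(number)
--
--     if len(temp) == 0:
--         return head, number, ""
--
--     tail = ''.join(temp[::-1])
--     if tail[0] == ' ':
--         tail = tail[1:]
--
--     return head, number, tail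
-- ===== SOURCE B (Python) =====
-- def fileSplit(file):
--     # forward scan with slices instead of popping from a reversed list
--     i = next((k for k, c in enumerate(file) if c.isdigit()), len(file))
--     rest = file[i:]
--     j = next((k for k, c in enumerate(rest) if not c.isdigit()), len(rest))
--     head = file[:i].lower()
--     number = int(rest[:j])
--     tail = rest[j:]
--     return head, number, tail[1:] if tail.startswith(' ') else tail
-- ===== Notes on version B (the rewrite author's own statement) =====
-- stated objective: simpler
-- what changed: Replaces A's reversed-list three-loop parser (building head/number by popping chars one at a time, then re-reversing the remainder) with one forward scan: find the first digit and the end of the digit run, then take the three pieces with slices.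
import Mathlib
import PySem

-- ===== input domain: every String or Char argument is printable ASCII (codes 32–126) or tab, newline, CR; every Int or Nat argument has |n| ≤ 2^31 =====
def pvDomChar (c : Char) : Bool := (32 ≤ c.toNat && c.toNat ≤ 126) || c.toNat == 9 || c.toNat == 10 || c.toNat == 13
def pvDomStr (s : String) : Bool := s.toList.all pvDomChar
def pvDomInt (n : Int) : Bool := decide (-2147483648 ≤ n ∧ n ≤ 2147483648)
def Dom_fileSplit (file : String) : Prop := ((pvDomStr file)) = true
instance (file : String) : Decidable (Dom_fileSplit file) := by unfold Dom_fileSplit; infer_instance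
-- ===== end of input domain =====

-- B replaces A's reversed-list popping parser with a single forward scan and slices (same O(n) cost, shorter).


-- ===== PORT A =====
-- `while temp: if temp[-1].isdigit(): break else: head += temp.pop()` — the string
-- under construction is represented by its char list (append at the end = +=).
def fileSplitHeadLoop (temp acc : List Char) : List Char × List Char :=
  if h : temp = [] then (acc, temp)
  else
    let c := temp.getLast h
    if PySem.Chars.isdigit c then (acc, temp)
    else fileSplitHeadLoop temp.dropLast (acc ++ [c])
termination_by temp.length
decreasing_by
  simpa [List.length_dropLast] using Nat.sub_lt (List.length_pos_of_ne_nil h) one_pos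

-- `while temp: if temp[-1].isdigit(): number += temp.pop() else: break`
def fileSplitNumLoop (temp acc : List Char) : List Char × List Char :=
  if h : temp = [] then (acc, temp)
  else
    let c := temp.getLast h
    if PySem.Chars.isdigit c then fileSplitNumLoop temp.dropLast (acc ++ [c])
    else (acc, temp)
termination_by temp.length
decreasing_by
  simpa [List.length_dropLast] using Nat.sub_lt (List.length_pos_of_ne_nil h) one_pos

-- Python's int(number) raises on '' — excluded by Pre_; the total form uses getD 0 there.
def fileSplit (file : String) : String × Int × String :=
  let temp := file.toList.reverse                  -- list(file[::-1])
  let hr := fileSplitHeadLoop temp []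
  let nr := fileSplitNumLoop hr.2 []
  let head := PySem.Chars.lower hr.1               -- head.lower()
  let number := (PySem.Int.ofChars? nr.1).getD 0   -- int(number)
  if nr.2.length = 0 then (String.ofList head, number, "")
  else
    let tail := nr.2.reverse                       -- ''.join(temp[::-1])
    let tail := if tail.head? = some ' ' then tail.drop 1 else tail  -- tail[0] == ' ' → tail[1:]
    (String.ofList head, number, String.ofList tail)

-- ===== PORT B =====
-- next((k for k, c in enumerate(l) if p c), len l)  is  List.findIdx p  (length when absent)
def fileSplit_alt (file : String) : String × Int × String :=
  let l := file.toList
  let i := l.findIdx (fun c => PySem.Chars.isdigit c)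
  let rest := l.drop i                             -- file[i:]
  let j := rest.findIdx (fun c => !PySem.Chars.isdigit c)
  let head := PySem.Chars.lower (l.take i)         -- file[:i].lower()
  let number := (PySem.Int.ofChars? (rest.take j)).getD 0  -- int(rest[:j])
  let tail := rest.drop j                          -- rest[j:]
  (String.ofList head, number,
    if PySem.Chars.startswith tail [' '] then String.ofList (tail.drop 1) else String.ofList tail)

-- ===== PRECONDITION & SPEC =====
-- Pre_ excludes exactly the strings with no digit character, on which Python A raises ValueError (int('')).
def Pre_fileSplit (file : String) : Prop :=
  file.toList.any (fun c => PySem.Chars.isdigit c) = true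
instance (file : String) : Decidable (Pre_fileSplit file) := by unfold Pre_fileSplit; infer_instance
def pvWitness_fileSplit : String := "a1"

def Spec_fileSplit (file : String) (out : String × Int × String) : Prop := out = fileSplit_alt file
instance (file : String) (out : String × Int × String) : Decidable (Spec_fileSplit file out) := by unfold Spec_fileSplit; infer_instance

-- ===== CLAIM (what is proved, stated in full; the proofs are below) =====
def Claim_equal_fileSplit : Prop := ∀ (file : String), Dom_fileSplit file → Pre_fileSplit file → Spec_fileSplit file (fileSplit file)

-- ===== LEMMAS AND PROOFS =====

theorem headLoop_reverse (l acc : List Char) :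
    fileSplitHeadLoop l.reverse acc =
      (acc ++ l.takeWhile (fun c => !PySem.Chars.isdigit c),
       (l.dropWhile (fun c => !PySem.Chars.isdigit c)).reverse) := by
  induction l generalizing acc with
  | nil => simp [fileSplitHeadLoop]
  | cons c t ih =>
    rw [List.reverse_cons, fileSplitHeadLoop]
    have hne : t.reverse ++ [c] ≠ [] := by simp
    rw [dif_neg hne]
    simp only [List.getLast_concat, List.dropLast_concat]
    by_cases hd : PySem.Chars.isdigit c
    · simp [hd]
    · simp [hd, ih]

theorem numLoop_reverse (l acc : List Char) :
    fileSplitNumLoop l.reverse acc =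
      (acc ++ l.takeWhile (fun c => PySem.Chars.isdigit c),
       (l.dropWhile (fun c => PySem.Chars.isdigit c)).reverse) := by
  induction l generalizing acc with
  | nil => simp [fileSplitNumLoop]
  | cons c t ih =>
    rw [List.reverse_cons, fileSplitNumLoop]
    have hne : t.reverse ++ [c] ≠ [] := by simp
    rw [dif_neg hne]
    simp only [List.getLast_concat, List.dropLast_concat]
    by_cases hd : PySem.Chars.isdigit c
    · simp [hd, ih]
    · simp [hd]

theorem take_findIdx_eq_takeWhile_not {α : Type} (p : α → Bool) (l : List α) :
    l.take (l.findIdx p) = l.takeWhile (fun a => !p a) := by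
  induction l with
  | nil => rfl
  | cons a t ih =>
    by_cases h : p a <;> simp [List.findIdx_cons, h, ih]

theorem drop_findIdx_eq_dropWhile_not {α : Type} (p : α → Bool) (l : List α) :
    l.drop (l.findIdx p) = l.dropWhile (fun a => !p a) := by
  induction l with
  | nil => rfl
  | cons a t ih =>
    by_cases h : p a <;> simp [List.findIdx_cons, h, ih]

theorem startswith_space (l : List Char) :
    PySem.Chars.startswith l [' '] = (l.head? == some ' ') := by
  cases l with
  | nil => decide
  | cons c t =>
    have h : PySem.Chars.startswith (c :: t) [' '] = true ↔ c = ' ' := by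
      rw [PySem.Chars.startswith_iff]
      constructor
      · intro hp
        rcases hp with ⟨s, hs⟩
        simpa using congrArg List.head? hs.symm
      · intro hc; subst hc; exact ⟨t, rfl⟩
    by_cases hc : c = ' '
    · subst hc; simp [h.mpr rfl]
    · have : PySem.Chars.startswith (c :: t) [' '] = false :=
        Bool.eq_false_iff.mpr (fun hb => hc (h.mp hb))
      simp [this, hc]

-- ===== VERDICT (by name: the statement is the Claim_ definition above) =====
theorem fileSplit_spec : Claim_equal_fileSplit := by
  intro file _ _
  unfold Spec_fileSplit fileSplit fileSplit_alt
  simp only [headLoop_reverse, numLoop_reverse, List.nil_append,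
    take_findIdx_eq_takeWhile_not, drop_findIdx_eq_dropWhile_not]
  set l := file.toList with hl
  set r := l.dropWhile (fun c => !PySem.Chars.isdigit c) with hr
  set g3 := r.dropWhile (fun c => PySem.Chars.isdigit c) with hg3
  have htake : r.takeWhile (fun c => !!PySem.Chars.isdigit c)
      = r.takeWhile (fun c => PySem.Chars.isdigit c) := by simp
  have hdrop : r.dropWhile (fun c => !!PySem.Chars.isdigit c) = g3 := by
    rw [hg3]; congr 1; funext c; simp
  simp only [htake, hdrop]
  by_cases hg : g3 = []
  · simp [hg, startswith_space]
  · simp only [List.length_reverse, List.reverse_reverse, startswith_space,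
      List.length_eq_zero_iff, if_neg hg]
    by_cases hsp : g3.head? = some ' '
    · simp [hsp, List.drop_one]
    · simp [hsp]
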